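-- pv_equiv track=rewrite | github.com/xorudlee97/Keras_LTK | Day0722/A07_Keras_Homwork.py | append_np_list
-- ===== SOURCE A (Python) =====
-- def append_np_list(list, a,b):
--     temp = []
--     for i in range(a,b+1):
--         temp.append(i)
--         if i % 4 == 0:
--             list.append(temp)
--             temp = []
--
--     return list
-- ===== SOURCE B (Python) =====
-- def append_np_list(list, a, b):
--     m = a + ((-a) % 4)          # smallest multiple of 4 that is >= a
--     start = a
--     while m <= b:
--         list.append([x for x in range(start, m + 1)])
--         start = m + 1
--         m += 4
--     return list
-- ===== Notes on version B (the rewrite author's own statement) =====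
-- stated objective: alternative
-- what changed: B computes the chunk boundaries (multiples of 4) arithmetically and appends each complete chunk as a whole range, instead of A's element-by-element accumulation with a flush on i%4==0.
import Mathlib
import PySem

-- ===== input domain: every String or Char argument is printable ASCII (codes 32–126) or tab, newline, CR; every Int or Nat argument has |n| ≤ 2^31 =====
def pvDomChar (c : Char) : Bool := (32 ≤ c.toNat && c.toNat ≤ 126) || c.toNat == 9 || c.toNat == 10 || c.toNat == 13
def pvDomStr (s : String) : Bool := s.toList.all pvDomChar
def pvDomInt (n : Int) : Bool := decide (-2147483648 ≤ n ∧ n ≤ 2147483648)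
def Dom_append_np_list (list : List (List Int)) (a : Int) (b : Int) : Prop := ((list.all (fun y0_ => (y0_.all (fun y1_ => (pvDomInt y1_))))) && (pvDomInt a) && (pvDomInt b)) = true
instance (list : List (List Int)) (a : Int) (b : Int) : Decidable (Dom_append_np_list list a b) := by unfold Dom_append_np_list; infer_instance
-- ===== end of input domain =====

-- B replaces A's element-by-element accumulation (flush on i % 4 == 0) by computing the
-- multiple-of-4 chunk boundaries arithmetically and appending whole ranges (objective: alternative).
-- Python A mutates its 'list' argument in place; the equivalence proved here is about the return value.

-- ===== PORT A =====
-- loop body: append i to temp; if i % 4 == 0 flush temp into the list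
def pvStep (s : List (List Int) × List Int) (i : Int) : List (List Int) × List Int :=
  let temp := s.2 ++ [i]
  if PySem.Int.mod i 4 == 0 then (s.1 ++ [temp], []) else (s.1, temp)

-- fold over range(a, b+1) with state (list, temp)
def append_np_list (list : List (List Int)) (a : Int) (b : Int) : List (List Int) :=
  ((PySem.List.pyRange a (b + 1) 1).foldl pvStep (list, [])).1

-- ===== PORT B =====
-- while m <= b: append range(start, m+1); start = m+1; m += 4
def appendNpChunks (list : List (List Int)) (start m b : Int) : List (List Int) :=
  if m ≤ b then
    appendNpChunks (list ++ [PySem.List.pyRange start (m + 1) 1]) (m + 1) (m + 4) b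
  else list
termination_by (b + 1 - m).toNat
decreasing_by omega

def append_np_list_alt (list : List (List Int)) (a : Int) (b : Int) : List (List Int) :=
  appendNpChunks list a (a + PySem.Int.mod (-a) 4) b

-- ===== PRECONDITION & SPEC =====
def Spec_append_np_list (list : List (List Int)) (a : Int) (b : Int) (out : List (List Int)) : Prop := out = append_np_list_alt list a b
instance (list : List (List Int)) (a : Int) (b : Int) (out : List (List Int)) : Decidable (Spec_append_np_list list a b out) := by unfold Spec_append_np_list; infer_instance

-- ===== CLAIM (what is proved, stated in full; the proofs are below) =====
def Claim_equal_append_np_list : Prop := ∀ (list : List (List Int)) (a : Int) (b : Int), Dom_append_np_list list a b → Spec_append_np_list list a b (append_np_list list a b)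

-- ===== LEMMAS AND PROOFS =====

-- fm a = smallest multiple of 4 that is ≥ a
def pvFm (a : Int) : Int := a + PySem.Int.mod (-a) 4

theorem pvFm_def (a : Int) : pvFm a = a + (-a) % 4 := by
  simp [pvFm, PySem.Int.mod, Int.fmod_eq_emod]

theorem pvFm_ge (a : Int) : a ≤ pvFm a := by rw [pvFm_def]; omega
theorem pvFm_of_mod (a : Int) (h : a % 4 = 0) : pvFm a = a := by rw [pvFm_def]; omega
theorem pvFm_succ_of_mod (a : Int) (h : a % 4 = 0) : pvFm (a + 1) = a + 4 := by
  rw [pvFm_def]; omega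
theorem pvFm_succ_of_not_mod (a : Int) (h : a % 4 ≠ 0) : pvFm (a + 1) = pvFm a := by
  rw [pvFm_def, pvFm_def]; omega

theorem pvStep_flush (s : List (List Int) × List Int) (i : Int) (h : i % 4 = 0) :
    pvStep s i = (s.1 ++ [s.2 ++ [i]], []) := by
  simp [pvStep, PySem.Int.mod, Int.fmod_eq_emod, h]

theorem pvStep_carry (s : List (List Int) × List Int) (i : Int) (h : i % 4 ≠ 0) :
    pvStep s i = (s.1, s.2 ++ [i]) := by
  simp [pvStep, PySem.Int.mod, Int.fmod_eq_emod, h]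

-- the main invariant: the A-fold from state (acc, temp) processing range(a, b+1) equals
-- B's while loop, with the pending temp prefixing the next chunk
theorem pv_fold_eq (n : Nat) : ∀ (a b : Int) (acc : List (List Int)) (temp : List Int),
    n = (b + 1 - a).toNat →
    ((PySem.List.pyRange a (b + 1) 1).foldl pvStep (acc, temp)).1 =
      (if pvFm a ≤ b then
        appendNpChunks (acc ++ [temp ++ PySem.List.pyRange a (pvFm a + 1) 1]) (pvFm a + 1) (pvFm a + 4) b
       else acc) := by
  induction n with
  | zero =>
    intro a b acc temp hn
    rw [PySem.List.pyRange_one_eq_nil (by omega)]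
    have : ¬ pvFm a ≤ b := by have := pvFm_ge a; omega
    simp [this]
  | succ k ih =>
    intro a b acc temp hn
    have hab : a ≤ b := by omega
    rw [PySem.List.pyRange_one_cons (by omega : a < b + 1), List.foldl_cons]
    by_cases h4 : a % 4 = 0
    · -- flush: temp ++ [a] appended as a chunk
      have hfa : pvFm a = a := pvFm_of_mod a h4
      rw [pvStep_flush _ _ h4, ih (a + 1) b (acc ++ [temp ++ [a]]) [] (by omega),
          pvFm_succ_of_mod a h4, if_pos (by omega : pvFm a ≤ b)]
      conv_rhs => rw [appendNpChunks]
      rw [hfa, PySem.List.pyRange_one_singleton]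
      by_cases h2 : a + 4 ≤ b
      · rw [if_pos h2, if_pos h2]
        simp
      · rw [if_neg h2, if_neg h2]
    · -- carry: temp grows by a
      rw [pvStep_carry _ _ h4, ih (a + 1) b acc (temp ++ [a]) (by omega),
          pvFm_succ_of_not_mod a h4]
      by_cases hle : pvFm a ≤ b
      · rw [if_pos hle, if_pos hle]
        congr 3
        rw [PySem.List.pyRange_one_cons (by have := pvFm_ge a; omega : a < pvFm a + 1)]
        simp
      · rw [if_neg hle, if_neg hle]

-- ===== VERDICT (by name: the statement is the Claim_ definition above) =====
theorem append_np_list_spec : Claim_equal_append_np_list := by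
  intro list a b _
  unfold Spec_append_np_list append_np_list append_np_list_alt
  rw [pv_fold_eq (b + 1 - a).toNat a b list [] rfl]
  show _ = appendNpChunks list a (pvFm a) b
  conv_rhs => rw [appendNpChunks]
  by_cases hle : pvFm a ≤ b
  · rw [if_pos hle, if_pos hle]
    simp
  · rw [if_neg hle, if_neg hle]
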